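-- pv_equiv track=rewrite | github.com/bellDev-code/Challenge_Algorithm | programmers/Ohsulgi/today06/05-todayChallenge.py | solution
-- ===== SOURCE A (Python) =====
-- def solution(babbling):
--     arr = ["aya", "ye", "woo", "ma", '']
--     result = [a+b+c+d+e for a in arr for b in arr for c in arr for d in arr for e in arr]
--
--     answer = 0
--     for i in babbling:
--         if i in result:
--             answer += 1
--     return answer
-- ===== SOURCE B (Python) =====
-- def solution(babbling):
--     tokens = ("aya", "ye", "woo", "ma")
--     answer = 0
--     for word in babbling:
--         s = word
--         cnt = 0
--         while s:
--             for t in tokens: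
--                 if s.startswith(t):
--                     s = s[len(t):]
--                     cnt += 1
--                     break
--             else:
--                 break
--         if not s and cnt <= 5:
--             answer += 1
--     return answer
-- ===== Notes on version B (the rewrite author's own statement) =====
-- stated objective: faster
-- what changed: B replaces A's precomputed list of all 3125 concatenations of up to five tokens (and a linear membership scan of it per word) by a greedy prefix-stripping parse of each word with a <=5 token cap.
import Mathlib
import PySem

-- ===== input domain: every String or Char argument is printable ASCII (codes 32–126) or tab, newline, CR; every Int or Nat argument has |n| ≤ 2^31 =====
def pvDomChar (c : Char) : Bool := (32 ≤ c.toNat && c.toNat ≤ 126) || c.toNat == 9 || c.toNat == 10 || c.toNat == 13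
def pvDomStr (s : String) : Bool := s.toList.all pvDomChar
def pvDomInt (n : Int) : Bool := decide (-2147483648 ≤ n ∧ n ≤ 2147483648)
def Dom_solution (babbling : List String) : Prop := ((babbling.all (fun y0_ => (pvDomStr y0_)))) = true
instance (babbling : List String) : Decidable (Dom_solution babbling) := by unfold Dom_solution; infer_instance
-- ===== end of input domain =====

-- B replaces A's precomputed list of all 3125 up-to-five-token concatenations (scanned per word)
-- by a greedy prefix-stripping parse with a <=5 token cap; faster by a large constant factor.


-- ===== PORT A =====
-- strings are handled as their character lists (Lean's String.append is kernel-opaque)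
def pvArr : List (List Char) := ["aya".toList, "ye".toList, "woo".toList, "ma".toList, []]

-- the five nested comprehensions building all concatenations a+b+c+d+e
def pvResult : List (List Char) :=
  pvArr.flatMap (fun a => pvArr.flatMap (fun b => pvArr.flatMap (fun c =>
    pvArr.flatMap (fun d => pvArr.map (fun e => a ++ b ++ c ++ d ++ e)))))

def solution (babbling : List String) : Int :=
  babbling.foldl (fun answer i => if i.toList ∈ pvResult then answer + 1 else answer) 0

-- ===== PORT B =====
-- the while loop: strip a matching token from the front, counting; none = the loop broke with s nonempty
def pvParse : List Char → Nat → Option Nat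
  | [], cnt => some cnt
  | c :: rest, cnt =>
    if (c :: rest).take 3 = "aya".toList then pvParse ((c :: rest).drop 3) (cnt + 1)
    else if (c :: rest).take 2 = "ye".toList then pvParse ((c :: rest).drop 2) (cnt + 1)
    else if (c :: rest).take 3 = "woo".toList then pvParse ((c :: rest).drop 3) (cnt + 1)
    else if (c :: rest).take 2 = "ma".toList then pvParse ((c :: rest).drop 2) (cnt + 1)
    else none
  termination_by s _ => s.length
  decreasing_by all_goals simp [List.length_drop]

def solution_alt (babbling : List String) : Int :=
  babbling.foldl (fun answer word =>
    match pvParse word.toList 0 with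
    | some cnt => if cnt ≤ 5 then answer + 1 else answer
    | none => answer) 0

-- ===== PRECONDITION & SPEC =====
def Spec_solution (babbling : List String) (out : Int) : Prop := out = solution_alt babbling
instance (babbling : List String) (out : Int) : Decidable (Spec_solution babbling out) := by unfold Spec_solution; infer_instance

-- ===== CLAIM (what is proved, stated in full; the proofs are below) =====
def Claim_equal_solution : Prop := ∀ (babbling : List String), Dom_solution babbling → Spec_solution babbling (solution babbling)

-- ===== LEMMAS AND PROOFS =====

def pvToks : List (List Char) := ["aya".toList, "ye".toList, "woo".toList, "ma".toList]

-- stripping one valid token is one step of the greedy loop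
theorem pvParse_cons_token (t rest : List Char) (cnt : Nat) (ht : t ∈ pvToks) :
    pvParse (t ++ rest) cnt = pvParse rest (cnt + 1) := by
  fin_cases ht <;> simp [pvParse]

-- a valid token list parses greedily to exactly its length
theorem pvParse_flatten (ts : List (List Char)) (hts : ∀ t ∈ ts, t ∈ pvToks) (cnt : Nat) :
    pvParse ts.flatten cnt = some (cnt + ts.length) := by
  induction ts generalizing cnt with
  | nil => simp [pvParse]
  | cons t ts ih =>
    simp only [List.flatten_cons, List.length_cons]
    rw [pvParse_cons_token t _ cnt (hts t (by simp)),
        ih (fun u hu => hts u (by simp [hu])) (cnt + 1)]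
    congr 1; omega

-- a successful greedy parse yields a token decomposition
theorem pvParse_decomp (s : List Char) (cnt : Nat) : ∀ n : Nat, pvParse s cnt = some n →
    ∃ ts : List (List Char), (∀ t ∈ ts, t ∈ pvToks) ∧ ts.flatten = s ∧ n = cnt + ts.length := by
  induction s, cnt using pvParse.induct with
  | case1 cnt => intro n h; exact ⟨[], by simp, by simp, by simp [pvParse] at h; simpa using h.symm⟩
  | case2 c rest cnt h1 ih =>
    intro n h
    rw [pvParse, if_pos h1] at h
    obtain ⟨ts, hts, hfl, hn⟩ := ih n h
    exact ⟨"aya".toList :: ts, by simp [pvToks] at hts ⊢; exact hts,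
      by rw [List.flatten_cons, hfl, ← h1, List.take_append_drop], by simp [hn]; omega⟩
  | case3 c rest cnt h1 h2 ih =>
    intro n h
    rw [pvParse, if_neg h1, if_pos h2] at h
    obtain ⟨ts, hts, hfl, hn⟩ := ih n h
    exact ⟨"ye".toList :: ts, by simp [pvToks] at hts ⊢; exact hts,
      by rw [List.flatten_cons, hfl, ← h2, List.take_append_drop], by simp [hn]; omega⟩
  | case4 c rest cnt h1 h2 h3 ih =>
    intro n h
    rw [pvParse, if_neg h1, if_neg h2, if_pos h3] at h
    obtain ⟨ts, hts, hfl, hn⟩ := ih n h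
    exact ⟨"woo".toList :: ts, by simp [pvToks] at hts ⊢; exact hts,
      by rw [List.flatten_cons, hfl, ← h3, List.take_append_drop], by simp [hn]; omega⟩
  | case5 c rest cnt h1 h2 h3 h4 ih =>
    intro n h
    rw [pvParse, if_neg h1, if_neg h2, if_neg h3, if_pos h4] at h
    obtain ⟨ts, hts, hfl, hn⟩ := ih n h
    exact ⟨"ma".toList :: ts, by simp [pvToks] at hts ⊢; exact hts,
      by rw [List.flatten_cons, hfl, ← h4, List.take_append_drop], by simp [hn]; omega⟩
  | case6 c rest cnt h1 h2 h3 h4 =>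
    intro n h
    rw [pvParse, if_neg h1, if_neg h2, if_neg h3, if_neg h4] at h
    cases h

-- the per-word tests agree
theorem pvTok_of_mem_arr (t : List Char) (h : t ∈ pvArr) (hne : t ≠ []) : t ∈ pvToks := by
  fin_cases h <;> simp_all [pvToks]

theorem pvArr_of_tok (t : List Char) (h : t ∈ pvToks) : t ∈ pvArr := by
  fin_cases h <;> simp [pvArr]

theorem pvFlatten_filter {α : Type} (l : List (List α)) :
    (l.filter (fun x => !x.isEmpty)).flatten = l.flatten := by
  induction l with
  | nil => rfl
  | cons x xs ih =>
    rcases x with _ | ⟨y, ys⟩ <;> simp [ih]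

theorem pvMem_result_of_len5 (l : List (List Char)) (hlen : l.length = 5)
    (hmem : ∀ t ∈ l, t ∈ pvArr) : l.flatten ∈ pvResult := by
  match l, hlen with
  | [a, b, c, d, e], _ =>
    simp only [pvResult, List.mem_flatMap, List.mem_map]
    refine ⟨a, hmem a (by simp), b, hmem b (by simp), c, hmem c (by simp),
      d, hmem d (by simp), e, hmem e (by simp), ?_⟩
    simp [List.append_assoc]

-- the per-word tests agree
theorem pvWord (w : List Char) :
    (w ∈ pvResult) ↔ (∃ n, pvParse w 0 = some n ∧ n ≤ 5) := by
  constructor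
  · intro h
    simp only [pvResult, List.mem_flatMap, List.mem_map] at h
    obtain ⟨a, ha, b, hb, c, hc, d, hd, e, he, hw⟩ := h
    set ts : List (List Char) := [a, b, c, d, e].filter (fun x => !x.isEmpty) with hts
    have hflat : ts.flatten = w := by
      rw [hts, pvFlatten_filter]; simpa [List.append_assoc] using hw
    have hmem : ∀ t ∈ ts, t ∈ pvToks := by
      intro t ht
      rw [hts, List.mem_filter] at ht
      obtain ⟨ht1, ht2⟩ := ht
      refine pvTok_of_mem_arr t ?_ (by simpa using ht2)
      simp only [List.mem_cons, List.not_mem_nil, or_false] at ht1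
      rcases ht1 with h | h | h | h | h <;> subst h <;> assumption
    refine ⟨ts.length, by rw [← hflat]; simpa using pvParse_flatten ts hmem 0, ?_⟩
    calc ts.length ≤ [a, b, c, d, e].length := List.length_filter_le _ _
      _ = 5 := by simp
  · rintro ⟨n, hp, h5⟩
    obtain ⟨ts, hmem, hflat, hn⟩ := pvParse_decomp w 0 n hp
    have hn' : ts.length = n := by omega
    have := pvMem_result_of_len5 (ts ++ List.replicate (5 - n) [])
      (by simp [hn']; omega)
      (by intro t ht
          rcases List.mem_append.1 ht with h | h
          · exact pvArr_of_tok t (hmem t h)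
          · simp [List.eq_of_mem_replicate h, pvArr])
    simpa [hflat] using this

-- ===== VERDICT (by name: the statement is the Claim_ definition above) =====
theorem solution_spec : Claim_equal_solution := by
  intro babbling hd
  clear hd
  unfold Spec_solution solution solution_alt
  induction babbling using List.reverseRecOn with
  | nil => rfl
  | append_singleton xs x ih =>
    rw [List.foldl_append, List.foldl_append, ih]
    simp only [List.foldl_cons, List.foldl_nil]
    rcases hp : pvParse x.toList 0 with _ | n
    · have : ¬ (x.toList ∈ pvResult) := by
        rw [pvWord]; rintro ⟨n, hn, -⟩; rw [hp] at hn; cases hn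
      simp [this]
    · by_cases h5 : n ≤ 5
      · have : x.toList ∈ pvResult := (pvWord _).2 ⟨n, hp, h5⟩
        simp [this, h5]
      · have : ¬ (x.toList ∈ pvResult) := by
          rw [pvWord]; rintro ⟨m, hm, hm5⟩; rw [hp] at hm; cases hm; exact h5 hm5
        simp [this, h5]
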